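-- pv_equiv track=rewrite | github.com/YoyinZyc/Leetcode_Python | Facebook/Pro34_Search for a Range.py | helper
-- ===== SOURCE A (Python) =====
-- def helper(nums, start, end, left, target):
--
--     if left:
--         i = start
--         j = end
--         while i <= j:
--             middle = (i + j) // 2
--             if nums[middle] == target:
--                 j = middle-1
--             else:
--                 i = middle+1
--         return i
--     else:
--         i = start
--         j = end
--         while i <= j:
--             middle = (i + j) // 2
--             if nums[middle] == target:
--                 i = middle+1
--             else:
--                 j = middle - 1
--         return j
-- ===== SOURCE B (Python) =====
-- def helper(nums, start, end, left, target):
--     # Single recursive divide-and-conquer splitter for both directions;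
--     # empty initial range handled up front.
--     if start > end:
--         return start if left else end
--     def split(i, j):
--         if i > j:
--             return i
--         m = (i + j) // 2
--         if (nums[m] == target) == left:
--             return split(i, m - 1)
--         return split(m + 1, j)
--     s = split(start, end)
--     return s if left else s - 1
-- ===== Notes on version B (the rewrite author's own statement) =====
-- stated objective: simpler
-- what changed: The two iterative while-loops are replaced by one recursive divide-and-conquer splitter shared by both directions (branch condition unified to (nums[m]==target)==left), with the boundary read off the split point; no speed claim.
-- outside the precondition, e.g. on helper([2, 0], -3, 1, True, -1): A returns 2, B returns 2
import Mathlib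
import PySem

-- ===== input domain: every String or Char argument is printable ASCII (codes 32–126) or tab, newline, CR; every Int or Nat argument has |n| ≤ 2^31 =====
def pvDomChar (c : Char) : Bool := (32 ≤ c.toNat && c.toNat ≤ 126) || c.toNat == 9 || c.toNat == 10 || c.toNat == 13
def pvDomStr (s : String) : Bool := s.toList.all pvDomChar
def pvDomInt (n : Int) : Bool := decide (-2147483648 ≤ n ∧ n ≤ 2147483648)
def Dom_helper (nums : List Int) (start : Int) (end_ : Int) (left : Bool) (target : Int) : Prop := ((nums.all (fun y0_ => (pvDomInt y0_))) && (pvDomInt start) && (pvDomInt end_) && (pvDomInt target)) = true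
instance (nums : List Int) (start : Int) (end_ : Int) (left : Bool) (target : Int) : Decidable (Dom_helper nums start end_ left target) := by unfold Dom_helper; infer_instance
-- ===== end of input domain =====

-- B replaces A's two iterative binary-search loops by one recursive divide-and-conquer
-- splitter shared by both directions; same result, same asymptotic cost (objective: simpler).


-- ===== PORT A =====
-- the 'left' while-loop of A; pyGet? none = Python IndexError (excluded by Pre_), 0 is a dummy
def helperLoopL (nums : List Int) (target : Int) (i j : Int) : Int :=
  if h : i ≤ j then
    let middle := PySem.Int.floordiv (i + j) 2
    match PySem.List.pyGet? nums middle with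
    | some v => if v == target then helperLoopL nums target i (middle - 1)
                else helperLoopL nums target (middle + 1) j
    | none => 0
  else i
termination_by (j + 1 - i).toNat
decreasing_by
  all_goals have hb := PySem.Int.floordiv_two_mid_bounds h
  all_goals omega

-- the 'right' while-loop of A
def helperLoopR (nums : List Int) (target : Int) (i j : Int) : Int :=
  if h : i ≤ j then
    let middle := PySem.Int.floordiv (i + j) 2
    match PySem.List.pyGet? nums middle with
    | some v => if v == target then helperLoopR nums target (middle + 1) j
                else helperLoopR nums target i (middle - 1)
    | none => 0
  else j
termination_by (j + 1 - i).toNat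
decreasing_by
  all_goals have hb := PySem.Int.floordiv_two_mid_bounds h
  all_goals omega

def helper (nums : List Int) (start : Int) (end_ : Int) (left : Bool) (target : Int) : Int :=
  if left then helperLoopL nums target start end_
  else helperLoopR nums target start end_

-- ===== PORT B =====
-- B's recursive splitter: descend left exactly when (nums[m] == target) == left
def splitGo (nums : List Int) (target : Int) (left : Bool) (i j : Int) : Int :=
  if h : i > j then i
  else
    let m := PySem.Int.floordiv (i + j) 2
    match PySem.List.pyGet? nums m with
    | some v => if (v == target) == left then splitGo nums target left i (m - 1)
                else splitGo nums target left (m + 1) j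
    | none => 0
termination_by (j + 1 - i).toNat
decreasing_by
  all_goals have hb := PySem.Int.floordiv_two_mid_bounds (by omega : i ≤ j)
  all_goals omega

def helper_alt (nums : List Int) (start : Int) (end_ : Int) (left : Bool) (target : Int) : Int :=
  if start > end_ then (if left then start else end_)
  else
    let s := splitGo nums target left start end_
    if left then s else s - 1

-- ===== PRECONDITION & SPEC =====
-- Pre_ excludes ranges [start, end_] reaching outside Python's valid index span [-len, len):
-- there the search may dereference an out-of-range index and raise IndexError; whether it
-- actually raises depends on the values along the search path, so the whole region is excluded.
def Pre_helper (nums : List Int) (start : Int) (end_ : Int) (left : Bool) (target : Int) : Prop :=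
  start > end_ ∨ (-(nums.length : Int) ≤ start ∧ end_ < nums.length)
instance (nums : List Int) (start : Int) (end_ : Int) (left : Bool) (target : Int) : Decidable (Pre_helper nums start end_ left target) := by unfold Pre_helper; infer_instance
def pvWitness_helper : List Int × Int × Int × Bool × Int := ([1, 2, 2, 3], 0, 3, true, 2)

def Spec_helper (nums : List Int) (start : Int) (end_ : Int) (left : Bool) (target : Int) (out : Int) : Prop := out = helper_alt nums start end_ left target
instance (nums : List Int) (start : Int) (end_ : Int) (left : Bool) (target : Int) (out : Int) : Decidable (Spec_helper nums start end_ left target out) := by unfold Spec_helper; infer_instance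

-- ===== CLAIM (what is proved, stated in full; the proofs are below) =====
def Claim_equal_helper : Prop := ∀ (nums : List Int) (start : Int) (end_ : Int) (left : Bool) (target : Int), Dom_helper nums start end_ left target → Pre_helper nums start end_ left target → Spec_helper nums start end_ left target (helper nums start end_ left target)

-- ===== LEMMAS AND PROOFS =====

-- under the in-range invariant, A's left loop equals B's splitter with left = true
theorem loopL_eq_split (nums : List Int) (target : Int) (i j : Int)
    (hinv : i ≤ j → -(nums.length : Int) ≤ i ∧ j < nums.length) :
    helperLoopL nums target i j = splitGo nums target true i j := by
  rw [helperLoopL, splitGo]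
  by_cases h : i ≤ j
  · have hb := PySem.Int.floordiv_two_mid_bounds h
    have hir : PySem.Raise.InRange nums.length (PySem.Int.floordiv (i + j) 2) := by
      have := hinv h
      constructor <;> omega
    simp only [h, if_pos, dif_pos, dif_neg (by omega : ¬ i > j)]
    cases hg : PySem.List.pyGet? nums (PySem.Int.floordiv (i + j) 2) with
    | none =>
      exact absurd hir ((PySem.List.pyGet?_eq_none_iff _ _).mp hg)
    | some v =>
      by_cases hv : v == target
      · simp only [hv, if_true]
        exact loopL_eq_split nums target i (PySem.Int.floordiv (i + j) 2 - 1)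
          (fun h' => by have := hinv h; omega)
      · simp only [Bool.not_eq_true] at hv
        simp only [hv, Bool.false_eq_true, if_false]
        exact loopL_eq_split nums target (PySem.Int.floordiv (i + j) 2 + 1) j
          (fun h' => by have := hinv h; omega)
  · simp [h, (by omega : i > j)]
termination_by (j + 1 - i).toNat
decreasing_by
  all_goals omega

-- under the in-range invariant, A's right loop equals B's splitter (left = false) minus one;
-- the hypothesis i ≤ j + 1 records that the loop is entered with a nonempty range or exits at i = j+1
theorem loopR_eq_split (nums : List Int) (target : Int) (i j : Int)
    (hij : i ≤ j + 1)
    (hinv : i ≤ j → -(nums.length : Int) ≤ i ∧ j < nums.length) :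
    helperLoopR nums target i j = splitGo nums target false i j - 1 := by
  rw [helperLoopR, splitGo]
  by_cases h : i ≤ j
  · have hb := PySem.Int.floordiv_two_mid_bounds h
    have hir : PySem.Raise.InRange nums.length (PySem.Int.floordiv (i + j) 2) := by
      have := hinv h
      constructor <;> omega
    simp only [h, if_pos, dif_pos, dif_neg (by omega : ¬ i > j)]
    cases hg : PySem.List.pyGet? nums (PySem.Int.floordiv (i + j) 2) with
    | none =>
      exact absurd hir ((PySem.List.pyGet?_eq_none_iff _ _).mp hg)
    | some v =>
      by_cases hv : v == target
      · simp only [hv, Bool.true_eq_false, if_false, if_true]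
        exact loopR_eq_split nums target (PySem.Int.floordiv (i + j) 2 + 1) j
          (by omega) (fun h' => by have := hinv h; omega)
      · simp only [Bool.not_eq_true] at hv
        simp only [hv, Bool.false_eq_true, if_false, if_true]
        exact loopR_eq_split nums target i (PySem.Int.floordiv (i + j) 2 - 1)
          (by omega) (fun h' => by have := hinv h; omega)
  · simp only [dif_neg h, dif_pos (by omega : i > j)]
    omega
termination_by (j + 1 - i).toNat
decreasing_by
  all_goals omega

-- ===== VERDICT (by name: the statement is the Claim_ definition above) =====
theorem helper_spec : Claim_equal_helper := by
  intro nums start end_ left target _ hpre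
  unfold Spec_helper helper helper_alt
  by_cases hse : start > end_
  · rw [if_pos hse]
    cases left
    · simp only [Bool.false_eq_true, if_false]
      rw [helperLoopR, dif_neg (by omega : ¬ start ≤ end_)]
    · simp only [if_true]
      rw [helperLoopL, dif_neg (by omega : ¬ start ≤ end_)]
  · rw [if_neg hse]
    have hinv : start ≤ end_ → -(nums.length : Int) ≤ start ∧ end_ < nums.length := by
      intro _
      rcases hpre with h | h
      · omega
      · exact h
    cases left
    · simp only [Bool.false_eq_true, if_false]
      exact loopR_eq_split nums target start end_ (by omega) hinv
    · simp only [if_true]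
      exact loopL_eq_split nums target start end_ hinv
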